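-- pv_equiv track=rewrite | github.com/IISkylineIII/Rosalind | BALLH.Py | dict_size
-- ===== SOURCE A (Python) =====
-- from functools import cache
--
-- def masses():
--     # Tabela de massas inteiras para os 20 aminoácidos padrão
--     return {
--         'A': 71, 'C': 103, 'D': 115, 'E': 129, 'F': 147,
--         'G': 57, 'H': 137, 'I': 113, 'K': 128, 'L': 113,
--         'M': 131, 'N': 114, 'P': 97, 'Q': 128, 'R': 156,
--         'S': 87, 'T': 101, 'V': 99, 'W': 186, 'Y': 163
--     }
--
-- def dict_size(sv, T, max_score):
--     mass = list(masses().values())  # Lista de massas inteiras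
--
--     sv = [0] + sv  # Adiciona zero no início para índice consistente
--     n = len(sv) - 1
--
--     @cache
--     def size(i, t):
--         # Base: quando tamanho 0 e score 0 => 1 (sequência vazia)
--         if i == 0 and t == 0:
--             return 1
--         # Casos impossíveis
--         if t < 0 or i <= 0:
--             return 0
--         # Soma sobre todas as massas possíveis
--         total = 0
--         for m in mass:
--             if i - m >= 0:
--                 total += size(i - m, t - sv[i])
--         return total
--
--     # Soma para todos os scores entre T e max_score
--     return sum(size(n, x) for x in range(T, max_score + 1))
-- ===== SOURCE B (Python) =====
-- def masses():
--     # Tabela de massas inteiras para os 20 aminoácidos padrão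
--     return {
--         'A': 71, 'C': 103, 'D': 115, 'E': 129, 'F': 147,
--         'G': 57, 'H': 137, 'I': 113, 'K': 128, 'L': 113,
--         'M': 131, 'N': 114, 'P': 97, 'Q': 128, 'R': 156,
--         'S': 87, 'T': 101, 'V': 99, 'W': 186, 'Y': 163
--     }
--
-- def dict_size(sv, T, max_score):
--     # Bottom-up DP: rows[i] maps a score t (t >= 0, the pruned suffix score)
--     # to the number of peptides of total mass i scoring t.
--     mass = list(masses().values())
--     svp = [0] + sv
--     n = len(sv)
--     rows = [{0: 1}]
--     for i in range(1, n + 1):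
--         s_i = svp[i]
--         row = {}
--         for m in mass:
--             if i - m >= 0:
--                 for s, c in rows[i - m].items():
--                     t = s + s_i
--                     if t >= 0:
--                         row[t] = row.get(t, 0) + c
--         rows.append(row)
--     return sum(rows[n].get(x, 0) for x in range(T, max_score + 1))
-- ===== Notes on version B (the rewrite author's own statement) =====
-- stated objective: alternative
-- what changed: Replaces the cached top-down recursion size(i,t) (queried once per score in [T,max_score]) by a bottom-up forward DP that builds, for each mass prefix i from 0 to n, a dict mapping each reachable nonnegative score to its count, then reads the answer off rows[n]; no argument mutation, duplicate masses preserved.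
import Mathlib
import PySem

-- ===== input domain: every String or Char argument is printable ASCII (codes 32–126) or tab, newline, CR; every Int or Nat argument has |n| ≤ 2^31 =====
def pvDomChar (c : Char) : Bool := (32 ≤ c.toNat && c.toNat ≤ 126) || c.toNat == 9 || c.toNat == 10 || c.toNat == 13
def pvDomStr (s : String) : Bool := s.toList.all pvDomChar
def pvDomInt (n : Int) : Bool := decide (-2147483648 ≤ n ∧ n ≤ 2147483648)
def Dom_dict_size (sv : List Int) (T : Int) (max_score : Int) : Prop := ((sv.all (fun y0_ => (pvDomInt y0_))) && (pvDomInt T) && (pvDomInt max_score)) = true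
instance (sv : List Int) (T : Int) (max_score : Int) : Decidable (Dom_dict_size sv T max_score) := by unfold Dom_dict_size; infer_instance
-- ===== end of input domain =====

-- B replaces the cached top-down recursion by a bottom-up DP over dicts of reachable scores (alternative decomposition; cost is proportional to the bottom-up-reachable score sets, which can be larger or smaller than A's top-down state set).
-- (A mutates only its local name 'sv'; the caller's list is untouched, so return-value equivalence is full equivalence.)

-- ===== PORT A =====
-- list(masses().values())
def pyMass : List Int :=
  [71, 103, 115, 129, 147, 57, 137, 113, 128, 113, 131, 114, 97, 128, 156, 87, 101, 99, 186, 163]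

-- every amino-acid mass is positive (cited by the ports' termination proofs)
theorem pyMass_pos : ∀ m ∈ pyMass, 0 < m := by decide

mutual
  -- the memoized recursion size(i, t) (memoization does not change the value)
  def sizeA (svp : List Int) (i t : Int) : Int :=
    if i = 0 ∧ t = 0 then 1
    else if h2 : t < 0 ∨ i ≤ 0 then 0
    else sizeLoopA svp i t (by omega) pyMass pyMass_pos 0
  termination_by 22 * i.toNat + 21
  decreasing_by simp only [pyMass, List.length]; omega
  -- the 'for m in mass' loop accumulating total (hi/hml are proof arguments for termination only)
  def sizeLoopA (svp : List Int) (i t : Int) (hi : 0 < i) (ml : List Int)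
      (hml : ∀ m ∈ ml, 0 < m) (total : Int) : Int :=
    match ml, hml with
    | [], _ => total
    | m :: rest, h =>
      if i - m ≥ 0 then
        -- svp[i] is always in range here (0 < i ≤ len(svp) - 1 at every call from dict_size): pyGetD is exact
        sizeLoopA svp i t hi rest (fun x hx => h x (List.mem_cons_of_mem _ hx))
          (total + sizeA svp (i - m) (t - PySem.List.pyGetD svp i 0))
      else
        sizeLoopA svp i t hi rest (fun x hx => h x (List.mem_cons_of_mem _ hx)) total
  termination_by 22 * i.toNat + ml.length
  decreasing_by
    · have := h m (List.mem_cons_self)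
      simp only [List.length_cons]; omega
    · simp only [List.length_cons]; omega
    · simp only [List.length_cons]; omega
end

def dict_size (sv : List Int) (T : Int) (max_score : Int) : Int :=
  let svp := [0] ++ sv
  let n : Int := (svp.length : Int) - 1
  ((PySem.List.pyRange T (max_score + 1) 1).map (fun x => sizeA svp n x)).sum

-- ===== PORT B =====
-- inner loop body: for (s, c) in rows[i-m].items(): t = s + s_i; if t >= 0: row[t] = row.get(t, 0) + c
def innerB (s_i : Int) (row : PySem.Dict Int Int) (sc : Int × Int) : PySem.Dict Int Int :=
  if 0 ≤ sc.1 + s_i then row.modify (sc.1 + s_i) 0 (· + sc.2) else row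

-- one iteration of 'for i in range(1, n+1)': build row i and append it
def rowStepB (svp : List Int) (rows : List (PySem.Dict Int Int)) (i : Int) : List (PySem.Dict Int Int) :=
  let s_i := PySem.List.pyGetD svp i 0   -- svp[i]: 1 ≤ i ≤ len(svp)-1 at every call, so exact
  let row := pyMass.foldl
    (fun row m =>
      if i - m ≥ 0 then
        -- rows[i-m]: 0 ≤ i-m < len(rows) at every call, so pyGetD is exact
        (PySem.List.pyGetD rows (i - m) PySem.Dict.empty).items.foldl (innerB s_i) row
      else row)
    PySem.Dict.empty
  rows ++ [row]

def dict_size_alt (sv : List Int) (T : Int) (max_score : Int) : Int :=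
  let svp := [0] ++ sv
  let n : Int := (sv.length : Int)
  let rows := (PySem.List.pyRange 1 (n + 1) 1).foldl (rowStepB svp) [PySem.Dict.ofList [(0, 1)]]
  ((PySem.List.pyRange T (max_score + 1) 1).map
    (fun x => (PySem.List.pyGetD rows n PySem.Dict.empty).getD x 0)).sum

-- ===== PRECONDITION & SPEC =====
def Spec_dict_size (sv : List Int) (T : Int) (max_score : Int) (out : Int) : Prop := out = dict_size_alt sv T max_score
instance (sv : List Int) (T : Int) (max_score : Int) (out : Int) : Decidable (Spec_dict_size sv T max_score out) := by unfold Spec_dict_size; infer_instance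

-- ===== CLAIM (what is proved, stated in full; the proofs are below) =====
def Claim_equal_dict_size : Prop := ∀ (sv : List Int) (T : Int) (max_score : Int), Dom_dict_size sv T max_score → Spec_dict_size sv T max_score (dict_size sv T max_score)

-- ===== LEMMAS AND PROOFS =====

-- invariant: rows.getD j is the row of counts for mass j, with duplicate-free keys
def GoodRows (svp : List Int) (rows : List (PySem.Dict Int Int)) : Prop :=
  ∀ j : Nat, j < rows.length →
    (rows.getD j PySem.Dict.empty).keys.Nodup ∧
    ∀ t : Int, (rows.getD j PySem.Dict.empty).getD t 0 = sizeA svp (j : Int) t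

-- the inner items-loop adds, at key t ≥ 0, the sum of the counts whose score lands on t
theorem scatter (s : Int) : ∀ (l : List (Int × Int)) (d0 : PySem.Dict Int Int) (t : Int),
    (l.foldl (innerB s) d0).getD t 0
      = d0.getD t 0 + (if 0 ≤ t then ((l.filter (fun p => p.1 + s = t)).map Prod.snd).sum else 0) := by
  intro l
  induction l with
  | nil => intro d0 t; simp
  | cons a rest ih =>
    intro d0 t
    simp only [List.foldl_cons, List.filter_cons]
    by_cases ha : 0 ≤ a.1 + s
    · rw [show innerB s d0 a = d0.modify (a.1 + s) 0 (· + a.2) from by simp [innerB, ha], ih,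
        PySem.Dict.getD_modify]
      by_cases hts : t = a.1 + s
      · subst hts
        simp [ha]
        omega
      · simp only [if_neg hts, if_neg (show ¬ decide (a.1 + s = t) = true from by simp [Ne.symm hts])]
    · rw [show innerB s d0 a = d0 from by simp [innerB, ha]]
      rw [ih]
      by_cases ht : 0 ≤ t
      · simp only [if_pos ht, show (decide (a.1 + s = t)) = false from by simp only [decide_eq_false_iff_not]; omega]
        simp
      · simp [ht]

-- with duplicate-free keys, that sum is exactly the source dict's count at t - s
theorem filterSum (s t : Int) : ∀ (l : List (Int × Int)), (l.map Prod.fst).Nodup →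
    ((l.filter (fun p => p.1 + s = t)).map Prod.snd).sum = (PySem.Dict.mk l).getD (t - s) 0 := by
  intro l
  induction l with
  | nil =>
    intro _
    simp [PySem.Dict.getD_eq_get?_getD, PySem.Dict.get?]
  | cons a rest ih =>
    obtain ⟨k, v⟩ := a
    intro hnd
    simp only [List.map_cons, List.nodup_cons] at hnd
    simp only [List.filter_cons, PySem.Dict.getD_eq_get?_getD, PySem.Dict.get?_mk_cons]
    by_cases hts : k + s = t
    · have h1 : (k == t - s) = true := by simp; omega
      simp only [if_pos (show decide (k + s = t) = true from by simp [hts]), h1,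
        List.map_cons, List.sum_cons]
      have h0 : ((PySem.Dict.mk rest).get? (t - s)) = none := by
        rw [PySem.Dict.get?_eq_none_iff_not_mem_keys]
        simp only [PySem.Dict.keys_mk]
        intro hmem
        exact hnd.1 (by rwa [show t - s = k from by omega] at hmem)
      have := ih hnd.2
      rw [PySem.Dict.getD_eq_get?_getD, h0] at this
      simp only [Option.getD_none] at this
      simp [this]
    · have h1 : (k == t - s) = false := by simp; omega
      simp only [if_neg (show ¬ decide (k + s = t) = true from by simp [hts]), h1]
      have := ih hnd.2
      rw [PySem.Dict.getD_eq_get?_getD] at this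
      simpa using this

theorem innerNodup (s : Int) : ∀ (l : List (Int × Int)) (d0 : PySem.Dict Int Int),
    d0.keys.Nodup → (l.foldl (innerB s) d0).keys.Nodup := by
  intro l
  induction l with
  | nil => intro d0 h; simpa using h
  | cons a rest ih =>
    intro d0 h
    simp only [List.foldl_cons]
    apply ih
    unfold innerB
    by_cases ha : 0 ≤ a.1 + s
    · rw [if_pos ha]
      exact PySem.Dict.nodup_keys_insert _ _ _ h
    · rwa [if_neg ha]

-- shifting the accumulator of the mass loop
theorem sizeLoopA_shift (svp : List Int) (i t : Int) (hi : 0 < i) :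
    ∀ (ml : List Int) (hml : ∀ m ∈ ml, 0 < m) (a b : Int),
    sizeLoopA svp i t hi ml hml (a + b) = sizeLoopA svp i t hi ml hml a + b := by
  intro ml
  induction ml with
  | nil => intro hml a b; rw [sizeLoopA, sizeLoopA]
  | cons m rest ih =>
    intro hml a b
    rw [sizeLoopA, sizeLoopA]
    by_cases hm : i - m ≥ 0
    · simp only [if_pos hm]
      rw [show a + b + sizeA svp (i - m) (t - PySem.List.pyGetD svp i 0)
            = (a + sizeA svp (i - m) (t - PySem.List.pyGetD svp i 0)) + b from by ring, ih]
    · simp only [if_neg hm]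
      exact ih _ _ _

-- the mass loop of rowStepB, abstracted over the list it still has to process
def massFoldB (svp : List Int) (rows : List (PySem.Dict Int Int)) (i : Int)
    (ml : List Int) (d0 : PySem.Dict Int Int) : PySem.Dict Int Int :=
  ml.foldl
    (fun row m =>
      if i - m ≥ 0 then
        (PySem.List.pyGetD rows (i - m) PySem.Dict.empty).items.foldl
          (innerB (PySem.List.pyGetD svp i 0)) row
      else row)
    d0

theorem massFoldB_nodup (svp : List Int) (rows : List (PySem.Dict Int Int)) (i : Int) :
    ∀ (ml : List Int) (d0 : PySem.Dict Int Int),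
    d0.keys.Nodup → (massFoldB svp rows i ml d0).keys.Nodup := by
  intro ml
  induction ml with
  | nil => intro d0 h; exact h
  | cons m rest ih =>
    intro d0 h
    rw [show massFoldB svp rows i (m :: rest) d0
          = massFoldB svp rows i rest
              (if i - m ≥ 0 then
                (PySem.List.pyGetD rows (i - m) PySem.Dict.empty).items.foldl
                  (innerB (PySem.List.pyGetD svp i 0)) d0
              else d0) from rfl]
    apply ih
    by_cases hm : i - m ≥ 0
    · rw [if_pos hm]; exact innerNodup _ _ _ h
    · rwa [if_neg hm]

theorem massFoldB_getD_neg (svp : List Int) (rows : List (PySem.Dict Int Int)) (i t : Int)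
    (ht : t < 0) : ∀ (ml : List Int) (d0 : PySem.Dict Int Int),
    (massFoldB svp rows i ml d0).getD t 0 = d0.getD t 0 := by
  intro ml
  induction ml with
  | nil => intro d0; rfl
  | cons m rest ih =>
    intro d0
    rw [show massFoldB svp rows i (m :: rest) d0
          = massFoldB svp rows i rest
              (if i - m ≥ 0 then
                (PySem.List.pyGetD rows (i - m) PySem.Dict.empty).items.foldl
                  (innerB (PySem.List.pyGetD svp i 0)) d0
              else d0) from rfl, ih]
    by_cases hm : i - m ≥ 0
    · rw [if_pos hm, scatter, if_neg (by omega : ¬ (0:Int) ≤ t), add_zero]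
    · rw [if_neg hm]

theorem massFoldB_getD (svp : List Int) (rows : List (PySem.Dict Int Int)) (i : Int) (hi : 0 < i)
    (hrows : ∀ m ∈ pyMass, 0 ≤ i - m →
      (PySem.List.pyGetD rows (i - m) PySem.Dict.empty).keys.Nodup ∧
      ∀ u, (PySem.List.pyGetD rows (i - m) PySem.Dict.empty).getD u 0 = sizeA svp (i - m) u) :
    ∀ (ml : List Int) (_hsub : ∀ m ∈ ml, m ∈ pyMass) (hml : ∀ m ∈ ml, 0 < m)
      (d0 : PySem.Dict Int Int) (total t : Int), 0 ≤ t →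
    (massFoldB svp rows i ml d0).getD t 0 + total
      = d0.getD t 0 + sizeLoopA svp i t hi ml hml total := by
  intro ml
  induction ml with
  | nil => intro _ hml d0 total t _; rw [sizeLoopA]; rfl
  | cons m rest ih =>
    intro hsub hml d0 total t ht
    rw [sizeLoopA,
      show massFoldB svp rows i (m :: rest) d0
        = massFoldB svp rows i rest
            (if i - m ≥ 0 then
              (PySem.List.pyGetD rows (i - m) PySem.Dict.empty).items.foldl
                (innerB (PySem.List.pyGetD svp i 0)) d0
            else d0) from rfl]
    by_cases hm : i - m ≥ 0
    · simp only [if_pos hm]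
      have hg := hrows m (hsub m List.mem_cons_self) hm
      have key : ((PySem.List.pyGetD rows (i - m) PySem.Dict.empty).items.foldl
            (innerB (PySem.List.pyGetD svp i 0)) d0).getD t 0
          = d0.getD t 0 + sizeA svp (i - m) (t - PySem.List.pyGetD svp i 0) := by
        rw [scatter, if_pos ht,
          filterSum (PySem.List.pyGetD svp i 0) t _ hg.1,
          show PySem.Dict.mk (PySem.List.pyGetD rows (i - m) PySem.Dict.empty).items
              = PySem.List.pyGetD rows (i - m) PySem.Dict.empty from rfl,
          hg.2]
      rw [ih (fun x hx => hsub x (List.mem_cons_of_mem _ hx))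
            (fun x hx => hml x (List.mem_cons_of_mem _ hx)) _ total t ht, key,
        sizeLoopA_shift]
      ring
    · simp only [if_neg hm]
      exact ih (fun x hx => hsub x (List.mem_cons_of_mem _ hx))
        (fun x hx => hml x (List.mem_cons_of_mem _ hx)) d0 total t ht

theorem row_correct (svp : List Int) (rows : List (PySem.Dict Int Int)) (i : Int) (hi : 0 < i)
    (hrows : ∀ m ∈ pyMass, 0 ≤ i - m →
      (PySem.List.pyGetD rows (i - m) PySem.Dict.empty).keys.Nodup ∧
      ∀ u, (PySem.List.pyGetD rows (i - m) PySem.Dict.empty).getD u 0 = sizeA svp (i - m) u) :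
    ∀ t : Int, (massFoldB svp rows i pyMass PySem.Dict.empty).getD t 0 = sizeA svp i t := by
  intro t
  by_cases ht : 0 ≤ t
  · have h := massFoldB_getD svp rows i hi hrows pyMass (fun _ h => h) pyMass_pos
      PySem.Dict.empty 0 t ht
    rw [sizeA, if_neg (by omega : ¬ (i = 0 ∧ t = 0)), dif_neg (by omega : ¬ (t < 0 ∨ i ≤ 0))]
    simpa using h
  · rw [massFoldB_getD_neg svp rows i t (by omega), sizeA,
      if_neg (by omega : ¬ (i = 0 ∧ t = 0)), dif_pos (by omega : t < 0 ∨ i ≤ 0)]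
    rfl

theorem good_step (svp : List Int) (rows : List (PySem.Dict Int Int)) (i : Int)
    (hlen : (rows.length : Int) = i) (h1 : 1 ≤ i) (hg : GoodRows svp rows) :
    GoodRows svp (rowStepB svp rows i) := by
  have hrows : ∀ m ∈ pyMass, 0 ≤ i - m →
      (PySem.List.pyGetD rows (i - m) PySem.Dict.empty).keys.Nodup ∧
      ∀ u, (PySem.List.pyGetD rows (i - m) PySem.Dict.empty).getD u 0 = sizeA svp (i - m) u := by
    intro m hm hge
    have hmpos := pyMass_pos m hm
    have hidx : PySem.List.pyGetD rows (i - m) PySem.Dict.empty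
        = rows.getD (i - m).toNat PySem.Dict.empty := by
      rw [PySem.List.pyGetD_eq_getElem rows PySem.Dict.empty hge
          (by omega : i - m < (rows.length : Int)),
        List.getD_eq_getElem _ _ (by omega : (i - m).toNat < rows.length)]
    obtain ⟨hnd, hval⟩ := hg (i - m).toNat (by omega)
    refine ⟨by rwa [hidx], ?_⟩
    intro u
    rw [hidx, hval u, Int.toNat_of_nonneg hge]
  intro j hj
  rw [show rowStepB svp rows i
        = rows ++ [massFoldB svp rows i pyMass PySem.Dict.empty] from rfl] at hj ⊢
  simp only [List.length_append, List.length_cons, List.length_nil] at hj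
  by_cases hjl : j < rows.length
  · rw [List.getD_append _ _ _ _ hjl]
    exact hg j hjl
  · have hje : j = rows.length := by omega
    subst hje
    rw [List.getD_append_right _ _ _ _ (le_refl _), Nat.sub_self]
    refine ⟨massFoldB_nodup svp rows i pyMass PySem.Dict.empty (by simp), ?_⟩
    intro t
    rw [show (([massFoldB svp rows i pyMass PySem.Dict.empty] :
          List (PySem.Dict Int Int)).getD 0 PySem.Dict.empty)
        = massFoldB svp rows i pyMass PySem.Dict.empty from rfl,
      row_correct svp rows i (by omega) hrows t, hlen]

theorem build (svp : List Int) : ∀ (k : Nat) (a : Int) (rows : List (PySem.Dict Int Int)),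
    (rows.length : Int) = a → 1 ≤ a → GoodRows svp rows →
    GoodRows svp ((PySem.List.pyRange a (a + k) 1).foldl (rowStepB svp) rows) ∧
    ((((PySem.List.pyRange a (a + k) 1).foldl (rowStepB svp) rows)).length : Int) = a + k := by
  intro k
  induction k with
  | zero =>
    intro a rows hlen h1 hg
    rw [show (a + (0:Nat) : Int) = a from by push_cast; ring, PySem.List.pyRange_one_eq_nil (le_refl a)]
    exact ⟨hg, by simpa using hlen⟩
  | succ k ih =>
    intro a rows hlen h1 hg
    rw [PySem.List.pyRange_one_cons (by omega : a < a + (k + 1 : Nat)), List.foldl_cons]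
    have hstep := good_step svp rows a hlen h1 hg
    have hlen' : ((rowStepB svp rows a).length : Int) = a + 1 := by
      rw [show rowStepB svp rows a
            = rows ++ [massFoldB svp rows a pyMass PySem.Dict.empty] from rfl]
      simp only [List.length_append, List.length_cons, List.length_nil]
      push_cast
      omega
    have := ih (a + 1) (rowStepB svp rows a) hlen' (by omega) hstep
    rw [show (a + 1) + (k : Int) = a + ((k + 1 : Nat) : Int) from by push_cast; ring] at this
    exact this

theorem goodRows_init (svp : List Int) :
    GoodRows svp [PySem.Dict.ofList [((0:Int), (1:Int))]] := by
  intro j hj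
  have hj0 : j = 0 := by simpa using hj
  subst hj0
  refine ⟨by decide, ?_⟩
  intro t
  rw [show ((([PySem.Dict.ofList [((0:Int), (1:Int))]] :
        List (PySem.Dict Int Int)).getD 0 PySem.Dict.empty))
      = PySem.Dict.empty.insert 0 1 from rfl,
    PySem.Dict.getD_insert]
  by_cases htz : t = 0
  · subst htz
    rw [sizeA]
    simp
  · rw [sizeA]
    simp [htz]

theorem dict_size_spec : Claim_equal_dict_size := by
  intro sv T mx _
  unfold Spec_dict_size dict_size dict_size_alt
  simp only []
  have hn : ((([0] ++ sv : List Int)).length : Int) - 1 = (sv.length : Int) := by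
    simp
  rw [hn]
  have hg0 : GoodRows ([0] ++ sv) [PySem.Dict.ofList [((0:Int), (1:Int))]] :=
    goodRows_init ([0] ++ sv)
  have hb := build ([0] ++ sv) sv.length 1 [PySem.Dict.ofList [((0:Int), (1:Int))]]
    (by simp) (by omega) hg0
  rw [show ((1:Int) + (sv.length : Nat)) = ((sv.length : Int) + 1) from by ring] at hb
  obtain ⟨hgood, hlen⟩ := hb
  refine congrArg List.sum (List.map_congr_left ?_)
  intro x hx
  obtain ⟨hnd, hval⟩ := hgood sv.length (by omega)
  rw [PySem.List.pyGetD_natCast, hval x]
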